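-- pv_equiv track=rewrite | github.com/qiao0313/IRNet-Chinese | preprocess/utils.py | partial_header
-- ===== SOURCE A (Python) =====
-- def partial_header(toks, idx, header_toks):
--     def check_in(list_one, list_two):
--         if len(set(list_one) & set(list_two)) == len(list_one) and (len(list_two) <= 7):
--             return True
--     for endIdx in reversed(range(idx + 1, len(toks))):
--         sub_toks = toks[idx: min(endIdx, len(toks))]
--         if len(sub_toks) > 1:
--             flag_count = 0
--             tmp_heads = None
--             for heads in header_toks:
--                 if check_in(sub_toks, heads):
--                     flag_count += 1
--                     tmp_heads = heads
--             if flag_count == 1: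
--                 return endIdx, tmp_heads
--     return idx, None
-- ===== SOURCE B (Python) =====
-- def partial_header(toks, idx, header_toks):
--     # Longest prefix toks[idx:endIdx] (length >= 2, all tokens distinct) whose
--     # tokens all occur in exactly one header of at most 7 tokens.  Header sets
--     # are built once and the candidate list is narrowed incrementally in a
--     # single forward pass.
--     candidates = [(h, set(h)) for h in header_toks if len(h) <= 7]
--     best = (idx, None)
--     prefix = set()
--     for k, tok in enumerate(toks[idx:len(toks) - 1], start=1):
--         if tok in prefix:      # a repeated token can never all lie in a set of header tokens
--             break
--         prefix.add(tok)
--         candidates = [c for c in candidates if tok in c[1]]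
--         if not candidates:
--             break
--         if k >= 2 and len(candidates) == 1:
--             best = (idx + k, candidates[0][0])
--     return best
-- ===== Notes on version B (the rewrite author's own statement) =====
-- stated objective: faster
-- what changed: A rescans every end index from the right, re-slicing the token list and re-building and intersecting token sets with every header at each index; B builds each header's set once and makes a single forward pass over the suffix, narrowing the candidate-header list incrementally and keeping the last unique match; Pre_ excludes negative idx, where A's slice wraps around from the end of the list (an accident of Python slicing for a scan start position) and B counts forward from idx, so neither value is specified.
import Mathlib
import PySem

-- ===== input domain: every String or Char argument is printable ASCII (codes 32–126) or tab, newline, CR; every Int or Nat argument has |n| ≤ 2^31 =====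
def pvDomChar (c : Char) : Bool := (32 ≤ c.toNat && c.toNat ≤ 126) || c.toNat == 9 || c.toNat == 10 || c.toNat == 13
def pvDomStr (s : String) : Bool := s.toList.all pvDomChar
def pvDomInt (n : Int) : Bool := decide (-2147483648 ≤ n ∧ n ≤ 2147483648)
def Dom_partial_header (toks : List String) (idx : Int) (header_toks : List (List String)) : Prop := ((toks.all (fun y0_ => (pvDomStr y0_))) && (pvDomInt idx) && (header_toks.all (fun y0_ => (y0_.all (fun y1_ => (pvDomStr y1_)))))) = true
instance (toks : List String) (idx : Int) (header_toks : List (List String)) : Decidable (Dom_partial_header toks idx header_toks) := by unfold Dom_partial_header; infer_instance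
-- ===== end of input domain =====

-- B replaces A's backward scan (which re-slices the token list and re-intersects sets at every end
-- index) by one forward pass over the suffix that precomputes the header sets once and narrows the
-- candidate-header list incrementally; objective: faster.

-- ===== PORT A =====
-- check_in(list_one, list_two)
def pvCheckIn (one two : List String) : Bool :=
  (PySem.Set.len (PySem.Set.inter (PySem.Set.ofList one) (PySem.Set.ofList two)) == PySem.List.len one)
    && (PySem.List.len two ≤ 7)

-- the 'for endIdx in reversed(range(idx+1, len(toks)))' loop with early return
def pvAgoA (toks : List String) (idx : Int) (header_toks : List (List String)) :
    List Int → Int × Option (List String)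
  | [] => (idx, none)
  | endIdx :: rest =>
    let sub_toks := PySem.List.slice toks (some idx) (some (min endIdx (PySem.List.len toks)))
    if 1 < PySem.List.len sub_toks then
      let p := header_toks.foldl
        (fun (p : Int × Option (List String)) heads =>
          if pvCheckIn sub_toks heads then (p.1 + 1, some heads) else p) (0, none)
      if p.1 == 1 then (endIdx, p.2) else pvAgoA toks idx header_toks rest
    else pvAgoA toks idx header_toks rest

def partial_header (toks : List String) (idx : Int) (header_toks : List (List String)) : Int × Option (List String) :=
  pvAgoA toks idx header_toks (PySem.List.pyRange (idx + 1) (PySem.List.len toks) 1).reverse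

-- ===== PORT B =====
-- the 'for k, tok in enumerate(toks[idx:len(toks)-1], start=1)' loop of Source B:
-- state = (candidates, prefix, best); 'break' = return best
def pvBgo (idx : Int) :
    List (Int × String) → List (List String × PySem.Set String) → PySem.Set String →
    Int × Option (List String) → Int × Option (List String)
  | [], _, _, best => best
  | (k, tok) :: rest, cands, pfx, best =>
    if PySem.Set.contains pfx tok then best
    else
      let pfx' := PySem.Set.add pfx tok
      let cands' := cands.filter (fun c => PySem.Set.contains c.2 tok)
      if cands' = [] then best
      else if 2 ≤ k ∧ cands'.length = 1 then
        pvBgo idx rest cands' pfx' (idx + k, some ((cands'.headD ([], PySem.Set.empty)).1))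
      else pvBgo idx rest cands' pfx' best

def partial_header_alt (toks : List String) (idx : Int) (header_toks : List (List String)) : Int × Option (List String) :=
  let cands := (header_toks.filter (fun h => PySem.List.len h ≤ 7)).map
    (fun h => (h, PySem.Set.ofList h))
  pvBgo idx
    (PySem.List.enumerate (PySem.List.slice toks (some idx) (some (PySem.List.len toks - 1))) 1)
    cands PySem.Set.empty (idx, none)

-- ===== PRECONDITION & SPEC =====
-- Pre_ excludes negative idx: there A's slice toks[idx:endIdx] wraps around from the end of the
-- list and A's returned end index is an accident of Python's negative-slice semantics for what is
-- a scan start position, while B counts forward from idx — an unspecified corner where neither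
-- value is the intended one.
def Pre_partial_header (toks : List String) (idx : Int) (header_toks : List (List String)) : Prop := 0 ≤ idx
instance (toks : List String) (idx : Int) (header_toks : List (List String)) : Decidable (Pre_partial_header toks idx header_toks) := by unfold Pre_partial_header; infer_instance
def pvWitness_partial_header : List String × Int × List (List String) := (["a", "b", "c"], 0, [["a", "b"]])
def Spec_partial_header (toks : List String) (idx : Int) (header_toks : List (List String)) (out : Int × Option (List String)) : Prop := out = partial_header_alt toks idx header_toks
instance (toks : List String) (idx : Int) (header_toks : List (List String)) (out : Int × Option (List String)) : Decidable (Spec_partial_header toks idx header_toks out) := by unfold Spec_partial_header; infer_instance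

-- ===== CLAIM (what is proved, stated in full; the proofs are below) =====
def Claim_equal_partial_header : Prop := ∀ (toks : List String) (idx : Int) (header_toks : List (List String)), Dom_partial_header toks idx header_toks → Pre_partial_header toks idx header_toks → Spec_partial_header toks idx header_toks (partial_header toks idx header_toks)

-- ===== LEMMAS AND PROOFS =====
theorem pv_discard_sublist (s : List String) (x : String) : List.Sublist (PySem.Set.discard s x) s := by
  have : PySem.Set.discard s x = s.filter (fun y => !(y == x)) := by simp [PySem.Set.discard]
  rw [this]; exact List.filter_sublist
theorem pv_ofList_sublist (xs : List String) : List.Sublist (PySem.Set.ofList xs) xs := by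
  induction xs with
  | nil => simp [PySem.Set.ofList_nil]
  | cons x xs ih =>
    rw [PySem.Set.ofList_cons]
    exact List.Sublist.cons₂ x (List.Sublist.trans (pv_discard_sublist _ x) ih)
theorem pv_ofList_length_eq_iff (xs : List String) :
    (PySem.Set.ofList xs).length = xs.length ↔ xs.Nodup := by
  constructor
  · intro h
    have h2 := List.Sublist.eq_of_length (pv_ofList_sublist xs) h
    rw [← h2]; exact PySem.Set.nodup_ofList (xs := xs)
  · intro h; rw [PySem.Set.ofList_eq_self_of_nodup (h := h)]

theorem pv_slice_eq (toks : List String) (a b : Int) :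
    PySem.List.slice toks (some a) (some b)
      = (toks.drop (PySem.List.clampIdx toks.length a)).take
          (PySem.List.clampIdx toks.length b - PySem.List.clampIdx toks.length a) := by
  simp [PySem.List.slice]

theorem pv_filter_ofList_length (xs : List String) (p : String → Bool) :
    ((PySem.Set.ofList xs).filter p).length = xs.length ↔ xs.Nodup ∧ ∀ x ∈ xs, p x = true := by
  have h1 : ((PySem.Set.ofList xs).filter p).length ≤ (PySem.Set.ofList xs).length :=
    List.length_filter_le _ _
  have h2 : (PySem.Set.ofList xs).length ≤ xs.length :=
    List.Sublist.length_le (pv_ofList_sublist xs)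
  constructor
  · intro h
    have e2 : (PySem.Set.ofList xs).length = xs.length := by omega
    have e1 : ((PySem.Set.ofList xs).filter p).length = (PySem.Set.ofList xs).length := by omega
    refine ⟨(pv_ofList_length_eq_iff xs).mp e2, ?_⟩
    intro x hx
    have := (List.length_filter_eq_length_iff).mp e1
    exact this x (by rw [PySem.Set.mem_ofList]; exact hx)
  · rintro ⟨hnd, hall⟩
    rw [PySem.Set.ofList_eq_self_of_nodup (h := hnd), List.filter_eq_self.mpr hall]

theorem pv_checkIn_iff (one two : List String) :
    pvCheckIn one two = true ↔ one.Nodup ∧ (∀ x ∈ one, x ∈ two) ∧ two.length ≤ 7 := by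
  have hinter : PySem.Set.inter (PySem.Set.ofList one) (PySem.Set.ofList two)
      = (PySem.Set.ofList one).filter (fun x => PySem.Set.contains (PySem.Set.ofList two) x) := by
    simp [PySem.Set.inter]
  simp only [pvCheckIn, Bool.and_eq_true, beq_iff_eq, decide_eq_true_eq, hinter,
    PySem.Set.len, PySem.List.len_eq, Nat.cast_inj]
  rw [pv_filter_ofList_length]
  constructor
  · rintro ⟨⟨hnd, hall⟩, h7⟩
    exact ⟨hnd, fun x hx => by
      have := hall x hx
      rwa [PySem.Set.contains_iff, PySem.Set.mem_ofList] at this, by omega⟩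
  · rintro ⟨hnd, hall, h7⟩
    exact ⟨⟨hnd, fun x hx => by rw [PySem.Set.contains_iff, PySem.Set.mem_ofList]; exact hall x hx⟩, by omega⟩

theorem pv_foldA (hts : List (List String)) (sub : List String) (c : Int) (o : Option (List String)) :
    hts.foldl (fun (p : Int × Option (List String)) heads =>
        if pvCheckIn sub heads then (p.1 + 1, some heads) else p) (c, o)
      = (c + ((hts.filter (fun h => pvCheckIn sub h)).length : Int),
         ((hts.filter (fun h => pvCheckIn sub h)).getLast?).or o) := by
  induction hts generalizing c o with
  | nil => simp
  | cons h tl ih =>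
    rw [List.foldl_cons]
    by_cases hc : pvCheckIn sub h = true
    · rw [if_pos hc, ih, List.filter_cons_of_pos hc, List.getLast?_cons]
      refine Prod.ext ?_ ?_
      · show c + 1 + _ = c + _
        simp only [List.length_cons]
        push_cast; ring
      · show (List.filter _ tl).getLast?.or (some h) = _
        cases htl : (tl.filter (fun h' => pvCheckIn sub h')).getLast? <;> simp [Option.or]
    · rw [if_neg hc, ih, List.filter_cons_of_neg hc]

theorem pv_checkIn_mono (t : List String) {j k : Nat} (hjk : j ≤ k) (h : List String)
    (hk : pvCheckIn (t.take k) h = true) : pvCheckIn (t.take j) h = true := by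
  rw [pv_checkIn_iff] at hk ⊢
  obtain ⟨hnd, hall, h7⟩ := hk
  have hsub : List.Sublist (t.take j) (t.take k) := by
    rw [show t.take j = (t.take k).take j by rw [List.take_take, min_eq_left hjk]]
    exact List.take_sublist _ _
  exact ⟨hnd.sublist hsub, fun x hx => hall x (hsub.subset hx), h7⟩

def pvM (hts : List (List String)) (t : List String) (k : Nat) : List (List String) :=
  hts.filter (fun h => pvCheckIn (t.take k) h)

theorem pv_pvM_filter (hts : List (List String)) (t : List String) {j k : Nat} (hjk : j ≤ k) :
    pvM hts t k = (pvM hts t j).filter (fun h => pvCheckIn (t.take k) h) := by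
  unfold pvM
  rw [List.filter_filter]
  refine (List.filter_congr ?_).symm
  intro h _
  by_cases hc : pvCheckIn (t.take k) h = true
  · simp [hc, pv_checkIn_mono t hjk h hc]
  · simp [hc]

theorem pv_pvM_nil_mono (hts : List (List String)) (t : List String) {j k : Nat} (hjk : j ≤ k)
    (hj : pvM hts t j = []) : pvM hts t k = [] := by
  rw [pv_pvM_filter hts t hjk, hj]; rfl

theorem pv_pvM_nil_of_dup (hts : List (List String)) (t : List String) {k : Nat}
    (hd : ¬ (t.take k).Nodup) : pvM hts t k = [] := by
  unfold pvM
  refine List.filter_eq_nil_iff.mpr ?_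
  intro h _ hc
  exact hd ((pv_checkIn_iff _ _).mp hc).1

def pvCandL (hts : List (List String)) (t : List String) (j : Nat) : List (List String) :=
  (hts.filter (fun h => PySem.List.len h ≤ 7)).filter (fun h => decide (∀ x ∈ t.take j, x ∈ h))

theorem pv_pvM_eq_CandL (hts : List (List String)) (t : List String) {k : Nat}
    (hnd : (t.take k).Nodup) : pvM hts t k = pvCandL hts t k := by
  unfold pvM pvCandL
  rw [List.filter_filter]
  refine List.filter_congr ?_
  intro h _
  rw [Bool.eq_iff_iff]
  rw [pv_checkIn_iff]
  simp only [Bool.and_eq_true, decide_eq_true_eq, PySem.List.len_eq]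
  constructor
  · rintro ⟨_, hall, h7⟩
    exact ⟨hall, by omega⟩
  · rintro ⟨hall, h7⟩
    exact ⟨hnd, hall, by omega⟩

def pvS (toks : List String) (idx : Int) : Nat := PySem.List.clampIdx toks.length idx
def pvT (toks : List String) (idx : Int) : List String := toks.drop (pvS toks idx)
def pvKmax (toks : List String) (idx : Int) : Nat := toks.length - 1 - pvS toks idx

theorem pv_clampIdx_eq (n : Nat) (a : Int) :
    PySem.List.clampIdx n a = if a < 0 then ((n : Int) + a).toNat else min a.toNat n := by
  simp [PySem.List.clampIdx]
  split_ifs <;> omega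

theorem pv_clampIdx_le (n : Nat) (a : Int) : PySem.List.clampIdx n a ≤ n := by
  rw [pv_clampIdx_eq]; split_ifs <;> omega

theorem pv_Astep (toks : List String) (idx : Int) (hts : List (List String)) (e : Int)
    (rest : List Int) (hhi : e < (toks.length : Int)) :
    pvAgoA toks idx hts (e :: rest) =
      if 1 < PySem.List.clampIdx toks.length e - pvS toks idx ∧
          (pvM hts (pvT toks idx) (PySem.List.clampIdx toks.length e - pvS toks idx)).length = 1
      then (e, (pvM hts (pvT toks idx) (PySem.List.clampIdx toks.length e - pvS toks idx)).getLast?)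
      else pvAgoA toks idx hts rest := by
  have hmin : min e (PySem.List.len toks) = e := by
    rw [PySem.List.len_eq]; omega
  have hsub : PySem.List.slice toks (some idx) (some (min e (PySem.List.len toks)))
      = (pvT toks idx).take (PySem.List.clampIdx toks.length e - pvS toks idx) := by
    rw [hmin, pv_slice_eq]; rfl
  set ℓ := PySem.List.clampIdx toks.length e - pvS toks idx with hℓ
  have hℓle : ℓ ≤ (pvT toks idx).length := by
    have := pv_clampIdx_le toks.length e
    simp only [pvT, List.length_drop]
    omega
  have hlen : ((pvT toks idx).take ℓ).length = ℓ := by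
    rw [List.length_take]; omega
  show (if 1 < PySem.List.len (PySem.List.slice toks (some idx) (some (min e (PySem.List.len toks)))) then _ else _) = _
  rw [hsub, PySem.List.len_eq, hlen]
  have hM : pvM hts (pvT toks idx) ℓ = hts.filter (fun h => pvCheckIn ((pvT toks idx).take ℓ) h) := rfl
  by_cases h1 : (1 : Int) < (ℓ : Int)
  · rw [if_pos h1, pv_foldA]
    simp only [Option.or_none, beq_iff_eq, zero_add, ← hM]
    by_cases hfc : ((pvM hts (pvT toks idx) ℓ).length : Int) = 1
    · rw [if_pos hfc, if_pos ⟨by omega, by exact_mod_cast hfc⟩]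
    · rw [if_neg hfc, if_neg (by rintro ⟨-, hc⟩; exact hfc (by exact_mod_cast hc))]
  · rw [if_neg h1, if_neg (by rintro ⟨h2, -⟩; omega)]

theorem pv_clampIdx_lt (toks : List String) (e : Int) (he : e < (toks.length : Int)) :
    PySem.List.clampIdx toks.length e ≤ toks.length - 1 := by
  rw [pv_clampIdx_eq]; split_ifs <;> omega

theorem pvAgoA_nil (toks : List String) (idx : Int) (hts : List (List String)) :
    pvAgoA toks idx hts [] = (idx, none) := rfl

theorem pv_descend_none (toks : List String) (idx : Int) (hts : List (List String))
    (hnone : ∀ k : Nat, k ≤ pvKmax toks idx → ¬(2 ≤ k ∧ (pvM hts (pvT toks idx) k).length = 1)) :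
    ∀ (c : Nat) (m : Int), (m - idx).toNat ≤ c → m < (toks.length : Int) →
      pvAgoA toks idx hts (PySem.List.pyRange m idx (-1)) = (idx, none) := by
  intro c
  induction c with
  | zero =>
    intro m hc hm
    rw [PySem.List.pyRange_neg_one_eq_nil (by omega), pvAgoA_nil]
  | succ c ih =>
    intro m hc hm
    by_cases hmi : m ≤ idx
    · rw [PySem.List.pyRange_neg_one_eq_nil hmi, pvAgoA_nil]
    · rw [PySem.List.pyRange_neg_one_cons (by omega), pv_Astep toks idx hts m _ hm]
      have hle : PySem.List.clampIdx toks.length m - pvS toks idx ≤ pvKmax toks idx := by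
        have := pv_clampIdx_lt toks m hm
        unfold pvKmax
        omega
      rw [if_neg (by
        rintro ⟨h1, h2⟩
        exact hnone _ hle ⟨by omega, h2⟩)]
      exact ih (m - 1) (by omega) (by omega)

theorem pv_idx_lt_sN (toks : List String) (idx : Int) (hidx : idx + 1 < (toks.length : Int)) :
    idx < (pvS toks idx : Int) + 2 := by
  unfold pvS
  rw [pv_clampIdx_eq]
  split_ifs <;> omega

theorem pv_clamp_toNat (toks : List String) (e : Int) (h0 : 0 ≤ e) (he : e < (toks.length : Int)) :
    (PySem.List.clampIdx toks.length e : Int) = e := by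
  rw [pv_clampIdx_eq]
  split_ifs <;> omega

theorem pv_descend_some (toks : List String) (idx : Int) (hts : List (List String))
    (hidx : idx + 1 < (toks.length : Int))
    (k' : Nat) (h2 : 2 ≤ k') (_hk : k' ≤ pvKmax toks idx)
    (hsu : (pvM hts (pvT toks idx) k').length = 1)
    (hmax : ∀ k : Nat, k' < k → k ≤ pvKmax toks idx → ¬(2 ≤ k ∧ (pvM hts (pvT toks idx) k).length = 1)) :
    ∀ (c : Nat) (m : Int), (m - ((pvS toks idx : Int) + k')).toNat ≤ c →
      (pvS toks idx : Int) + k' ≤ m → m < (toks.length : Int) →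
      pvAgoA toks idx hts (PySem.List.pyRange m idx (-1))
        = ((pvS toks idx : Int) + k', (pvM hts (pvT toks idx) k').getLast?) := by
  have hidxlt := pv_idx_lt_sN toks idx hidx
  intro c
  induction c with
  | zero =>
    intro m hc hlo hm
    have hm0 : m = (pvS toks idx : Int) + k' := by omega
    subst hm0
    rw [PySem.List.pyRange_neg_one_cons (by omega), pv_Astep toks idx hts _ _ hm]
    have hcl : PySem.List.clampIdx toks.length ((pvS toks idx : Int) + k') = pvS toks idx + k' := by
      have := pv_clamp_toNat toks ((pvS toks idx : Int) + k') (by omega) hm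
      omega
    rw [hcl]
    have hd : pvS toks idx + k' - pvS toks idx = k' := by omega
    rw [hd]
    rw [if_pos ⟨by omega, hsu⟩]
  | succ c ih =>
    intro m hc hlo hm
    by_cases hme : m = (pvS toks idx : Int) + k'
    · subst hme; exact ih _ (by omega) (by omega) hm
    · rw [PySem.List.pyRange_neg_one_cons (by omega), pv_Astep toks idx hts m _ hm]
      have hcl : (PySem.List.clampIdx toks.length m : Int) = m :=
        pv_clamp_toNat toks m (by omega) hm
      have hle : PySem.List.clampIdx toks.length m - pvS toks idx ≤ pvKmax toks idx := by
        have := pv_clampIdx_lt toks m hm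
        unfold pvKmax
        omega
      rw [if_neg (by
        rintro ⟨h1, hlen⟩
        exact hmax _ (by omega) hle ⟨by omega, hlen⟩)]
      exact ih (m - 1) (by omega) (by omega) (by omega)

theorem pv_CandL_succ (hts : List (List String)) (t : List String) (j : Nat)
    (hj : j < t.length) :
    pvCandL hts t (j+1) = (pvCandL hts t j).filter (fun h => decide (t[j] ∈ h)) := by
  unfold pvCandL
  simp only [List.filter_filter]
  refine List.filter_congr ?_
  intro h _
  rw [List.take_succ_eq_append_getElem hj, Bool.eq_iff_iff]
  simp only [Bool.and_eq_true, decide_eq_true_eq, List.forall_mem_append,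
    List.forall_mem_singleton]
  tauto

theorem pv_take_nodup_mono (t : List String) {j k : Nat} (hjk : j ≤ k)
    (hd : ¬ (t.take j).Nodup) : ¬ (t.take k).Nodup := by
  intro hk
  refine hd (hk.sublist ?_)
  rw [show t.take j = (t.take k).take j by rw [List.take_take, min_eq_left hjk]]
  exact List.take_sublist _ _

theorem pv_t_len (toks : List String) (idx : Int) :
    (pvT toks idx).length = toks.length - pvS toks idx := by
  simp [pvT]

theorem pv_tl_len (toks : List String) (idx : Int) :
    ((pvT toks idx).take (pvKmax toks idx)).length = pvKmax toks idx := by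
  rw [List.length_take]
  have := pv_t_len toks idx
  unfold pvKmax at *
  omega

theorem pv_j_lt_tlen (toks : List String) (idx : Int) (j : Nat) (hj1 : 1 ≤ j)
    (hj : j ≤ pvKmax toks idx) : j - 1 < (pvT toks idx).length := by
  have := pv_t_len toks idx
  unfold pvKmax at hj
  omega

theorem pv_Bstep (toks : List String) (idx : Int) (hts : List (List String))
    (j : Nat) (hj1 : 1 ≤ j) (hjk : j ≤ pvKmax toks idx)
    (hj2 : j - 1 < (pvT toks idx).length)
    (res : Int × Option (List String)) :
    pvBgo idx ((PySem.List.enumerate ((pvT toks idx).take (pvKmax toks idx)) 1).drop (j-1))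
        ((pvCandL hts (pvT toks idx) (j-1)).map (fun h => (h, PySem.Set.ofList h)))
        (PySem.Set.ofList ((pvT toks idx).take (j-1))) res
    = if (pvT toks idx)[j-1] ∈ (pvT toks idx).take (j-1) then res
      else if pvCandL hts (pvT toks idx) j = [] then res
      else if 2 ≤ j ∧ (pvCandL hts (pvT toks idx) j).length = 1 then
        pvBgo idx ((PySem.List.enumerate ((pvT toks idx).take (pvKmax toks idx)) 1).drop j)
          ((pvCandL hts (pvT toks idx) j).map (fun h => (h, PySem.Set.ofList h)))
          (PySem.Set.ofList ((pvT toks idx).take j))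
          (idx + j,
            some (((pvCandL hts (pvT toks idx) j).map (fun h => (h, PySem.Set.ofList h))).headD ([], PySem.Set.empty)).1)
      else
        pvBgo idx ((PySem.List.enumerate ((pvT toks idx).take (pvKmax toks idx)) 1).drop j)
          ((pvCandL hts (pvT toks idx) j).map (fun h => (h, PySem.Set.ofList h)))
          (PySem.Set.ofList ((pvT toks idx).take j)) res := by
  have htllen := pv_tl_len toks idx
  have hel : (PySem.List.enumerate ((pvT toks idx).take (pvKmax toks idx)) 1).length
      = ((pvT toks idx).take (pvKmax toks idx)).length := PySem.List.length_enumerate _ 1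
  have hjlt : j - 1 < (PySem.List.enumerate ((pvT toks idx).take (pvKmax toks idx)) 1).length := by
    omega
  have hjtl : j - 1 < ((pvT toks idx).take (pvKmax toks idx)).length := by omega
  have hdrop : (PySem.List.enumerate ((pvT toks idx).take (pvKmax toks idx)) 1).drop (j-1)
      = ((1 : Int) + (j-1 : Nat), ((pvT toks idx).take (pvKmax toks idx))[j-1])
          :: (PySem.List.enumerate ((pvT toks idx).take (pvKmax toks idx)) 1).drop j := by
    rw [List.drop_eq_getElem_cons hjlt, PySem.List.getElem_enumerate,
      show j - 1 + 1 = j from by omega]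
  have hgete : ((pvT toks idx).take (pvKmax toks idx))[j-1]'hjtl = (pvT toks idx)[j-1]'hj2 :=
    List.getElem_take
  have hk : (1 : Int) + ((j-1 : Nat) : Int) = (j : Int) := by omega
  rw [hdrop]
  show (if PySem.Set.contains _ _ then _ else _) = _
  have htake : (pvT toks idx).take j = (pvT toks idx).take (j-1) ++ [(pvT toks idx)[j-1]] := by
    conv_lhs => rw [show j = (j-1)+1 by omega]
    exact List.take_succ_eq_append_getElem hj2
  have hseen : PySem.Set.add (PySem.Set.ofList ((pvT toks idx).take (j-1))) ((pvT toks idx)[j-1]'hj2)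
      = PySem.Set.ofList ((pvT toks idx).take j) := by
    rw [htake, PySem.Set.ofList_append_singleton]
  have hcands : ((pvCandL hts (pvT toks idx) (j-1)).map (fun h => (h, PySem.Set.ofList h))).filter
        (fun c => PySem.Set.contains c.2 ((pvT toks idx)[j-1]'hj2))
      = (pvCandL hts (pvT toks idx) j).map (fun h => (h, PySem.Set.ofList h)) := by
    rw [List.filter_map]
    congr 1
    have : pvCandL hts (pvT toks idx) j
        = (pvCandL hts (pvT toks idx) (j-1)).filter (fun h => decide ((pvT toks idx)[j-1] ∈ h)) := by
      conv_lhs => rw [show j = (j-1)+1 by omega]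
      exact pv_CandL_succ hts (pvT toks idx) (j-1) hj2
    rw [this]
    refine List.filter_congr ?_
    intro h _
    show PySem.Set.contains (PySem.Set.ofList h) ((pvT toks idx)[j-1]) = decide ((pvT toks idx)[j-1] ∈ h)
    rw [Bool.eq_iff_iff, PySem.Set.contains_iff, PySem.Set.mem_ofList]
    simp
  rw [hgete]
  have hcont : (PySem.Set.contains (PySem.Set.ofList ((pvT toks idx).take (j-1))) ((pvT toks idx)[j-1]'hj2) = true)
      ↔ ((pvT toks idx)[j-1]'hj2 ∈ (pvT toks idx).take (j-1)) := by
    rw [PySem.Set.contains_iff, PySem.Set.mem_ofList]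
  by_cases hmem : (pvT toks idx)[j-1]'hj2 ∈ (pvT toks idx).take (j-1)
  · rw [if_pos (hcont.mpr hmem), if_pos hmem]
  · rw [if_neg (fun hc => hmem (hcont.mp hc)), if_neg hmem]
    show (if _ = ([] : List (List String × PySem.Set String)) then _ else _) = _
    rw [hcands, hseen]
    by_cases hnil : pvCandL hts (pvT toks idx) j = []
    · rw [if_pos (by rw [hnil]; rfl), if_pos hnil]
    · rw [if_neg (by simp [hnil]), if_neg hnil]
      by_cases hcond : 2 ≤ j ∧ (pvCandL hts (pvT toks idx) j).length = 1
      · rw [if_pos (by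
            refine ⟨?_, by rw [List.length_map]; exact hcond.2⟩
            rw [hk]; exact_mod_cast hcond.1),
          if_pos hcond, hk]
      · rw [if_neg (by
            rintro ⟨hc1, hc2⟩
            rw [hk] at hc1
            exact hcond ⟨by exact_mod_cast hc1, by rwa [List.length_map] at hc2⟩),
          if_neg hcond]

theorem pv_nodup_take_succ (t : List String) (j : Nat) (hj2 : j - 1 < t.length) (hj1 : 1 ≤ j)
    (hnd : (t.take (j-1)).Nodup) (hmem : t[j-1] ∉ t.take (j-1)) : (t.take j).Nodup := by
  have htake : t.take j = t.take (j-1) ++ [t[j-1]] := by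
    conv_lhs => rw [show j = (j-1)+1 by omega]
    exact List.take_succ_eq_append_getElem hj2
  rw [htake]
  simp only [List.nodup_append, List.nodup_singleton]
  refine ⟨hnd, trivial, ?_⟩
  intro a ha b hb
  rw [List.mem_singleton] at hb
  subst hb
  exact fun h => hmem (h ▸ ha)

theorem pv_drop_enum_nil (toks : List String) (idx : Int) (j : Nat) (hj : pvKmax toks idx ≤ j) :
    (PySem.List.enumerate ((pvT toks idx).take (pvKmax toks idx)) 1).drop j = [] := by
  refine List.drop_eq_nil_of_le ?_
  have hel := PySem.List.length_enumerate ((pvT toks idx).take (pvKmax toks idx)) 1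
  have := pv_tl_len toks idx
  omega

theorem pv_ascend (toks : List String) (idx : Int) (hts : List (List String)) :
    ∀ (c j : Nat), 1 ≤ j → pvKmax toks idx + 1 - j ≤ c → j ≤ pvKmax toks idx + 1 →
      ((pvT toks idx).take (j-1)).Nodup →
      ∀ res : Int × Option (List String),
      (∀ k' : Nat, ((j ≤ k' ∧ k' ≤ pvKmax toks idx ∧ 2 ≤ k' ∧ (pvM hts (pvT toks idx) k').length = 1 ∧
            (∀ k : Nat, k' < k → k ≤ pvKmax toks idx → ¬(2 ≤ k ∧ (pvM hts (pvT toks idx) k).length = 1))) →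
          False)) →
      pvBgo idx ((PySem.List.enumerate ((pvT toks idx).take (pvKmax toks idx)) 1).drop (j-1))
        ((pvCandL hts (pvT toks idx) (j-1)).map (fun h => (h, PySem.Set.ofList h)))
        (PySem.Set.ofList ((pvT toks idx).take (j-1))) res = res := by
  intro c
  induction c with
  | zero =>
    intro j hj1 hc hjle hnd res hnone
    rw [pv_drop_enum_nil toks idx (j-1) (by omega)]
    rfl
  | succ c ih =>
    intro j hj1 hc hjle hnd res hnone
    by_cases hj : j ≤ pvKmax toks idx
    · have hj2 : j - 1 < (pvT toks idx).length := pv_j_lt_tlen toks idx j hj1 hj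
      rw [pv_Bstep toks idx hts j hj1 hj hj2 res]
      by_cases hmem : (pvT toks idx)[j-1] ∈ (pvT toks idx).take (j-1)
      · rw [if_pos hmem]
      · rw [if_neg hmem]
        have hndj : ((pvT toks idx).take j).Nodup :=
          pv_nodup_take_succ _ j hj2 hj1 hnd hmem
        by_cases hnil : pvCandL hts (pvT toks idx) j = []
        · rw [if_pos hnil]
        · rw [if_neg hnil]
          have hcondF : ¬(2 ≤ j ∧ (pvCandL hts (pvT toks idx) j).length = 1) := by
            rintro ⟨ha, hb⟩
            have hPj : 2 ≤ j ∧ (pvM hts (pvT toks idx) j).length = 1 := by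
              rw [pv_pvM_eq_CandL hts _ hndj]; exact ⟨ha, hb⟩
            set P : Nat → Prop := fun k => 2 ≤ k ∧ (pvM hts (pvT toks idx) k).length = 1 with hP
            set k0 := Nat.findGreatest P (pvKmax toks idx) with hk0
            have hspec : P k0 := Nat.findGreatest_spec (P := P) hj hPj
            refine hnone k0 ⟨Nat.le_findGreatest hj hPj, Nat.findGreatest_le _,
              hspec.1, hspec.2, ?_⟩
            intro k hk1 hk2 hPk
            exact Nat.findGreatest_is_greatest hk1 hk2 hPk
          rw [if_neg hcondF]
          have := ih (j+1) (by omega) (by omega) (by omega) (by simpa using hndj) res (by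
            rintro k' ⟨ha, hb, hcc, hd, he⟩
            exact hnone k' ⟨by omega, hb, hcc, hd, he⟩)
          simpa using this
    · rw [pv_drop_enum_nil toks idx (j-1) (by omega)]
      rfl

theorem pv_ascend_some (toks : List String) (idx : Int) (hts : List (List String))
    (k' : Nat) (h2 : 2 ≤ k') (hk : k' ≤ pvKmax toks idx)
    (hsu : (pvM hts (pvT toks idx) k').length = 1)
    (hmax : ∀ k : Nat, k' < k → k ≤ pvKmax toks idx → ¬(2 ≤ k ∧ (pvM hts (pvT toks idx) k).length = 1)) :
    ∀ (c j : Nat), 1 ≤ j → pvKmax toks idx + 1 - j ≤ c → j ≤ k' →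
      ((pvT toks idx).take (j-1)).Nodup →
      ∀ res : Int × Option (List String),
      pvBgo idx ((PySem.List.enumerate ((pvT toks idx).take (pvKmax toks idx)) 1).drop (j-1))
        ((pvCandL hts (pvT toks idx) (j-1)).map (fun h => (h, PySem.Set.ofList h)))
        (PySem.Set.ofList ((pvT toks idx).take (j-1))) res
      = (idx + k', (pvM hts (pvT toks idx) k').getLast?) := by
  intro c
  induction c with
  | zero =>
    intro j hj1 hc hjk' hnd res
    omega
  | succ c ih =>
    intro j hj1 hc hjk' hnd res
    have hj : j ≤ pvKmax toks idx := le_trans hjk' hk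
    have hj2 : j - 1 < (pvT toks idx).length := pv_j_lt_tlen toks idx j hj1 hj
    rw [pv_Bstep toks idx hts j hj1 hj hj2 res]
    have hmem : (pvT toks idx)[j-1] ∉ (pvT toks idx).take (j-1) := by
      intro hmem
      have hndk : ¬ ((pvT toks idx).take k').Nodup := by
        refine pv_take_nodup_mono _ (j := j) (by omega) ?_
        intro hndj
        have htake : (pvT toks idx).take j = (pvT toks idx).take (j-1) ++ [(pvT toks idx)[j-1]] := by
          conv_lhs => rw [show j = (j-1)+1 by omega]
          exact List.take_succ_eq_append_getElem hj2
        rw [htake] at hndj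
        rcases List.nodup_append.mp hndj with ⟨-, -, hdisj⟩
        exact hdisj _ hmem _ (List.mem_singleton_self _) rfl
      rw [pv_pvM_nil_of_dup hts _ hndk] at hsu
      simp at hsu
    rw [if_neg hmem]
    have hndj : ((pvT toks idx).take j).Nodup := pv_nodup_take_succ _ j hj2 hj1 hnd hmem
    have hMj : pvM hts (pvT toks idx) j = pvCandL hts (pvT toks idx) j :=
      pv_pvM_eq_CandL hts _ hndj
    have hnil : pvCandL hts (pvT toks idx) j ≠ [] := by
      intro hnil
      have : pvM hts (pvT toks idx) k' = [] :=
        pv_pvM_nil_mono hts _ hjk' (by rw [hMj, hnil])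
      rw [this] at hsu
      simp at hsu
    rw [if_neg hnil]
    by_cases hje : j = k'
    · subst hje
      rw [if_pos ⟨h2, by rw [← hMj]; exact hsu⟩]
      obtain ⟨u, hu⟩ := List.length_eq_one_iff.mp hsu
      have hCu : pvCandL hts (pvT toks idx) j = [u] := by rw [← hMj, hu]
      have hres : (idx + (j : Int),
          some ((((pvCandL hts (pvT toks idx) j).map (fun h => (h, PySem.Set.ofList h))).headD
            ([], PySem.Set.empty)).1))
          = (idx + (j : Int), (pvM hts (pvT toks idx) j).getLast?) := by
        rw [hCu, hu]
        rfl
      rw [hres]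
      have := pv_ascend toks idx hts c (j+1) (by omega) (by omega) (by omega)
        (by simpa using hndj) (idx + (j : Int), (pvM hts (pvT toks idx) j).getLast?) (by
          rintro k'' ⟨ha, hb, hcc, hd, -⟩
          exact hmax k'' (by omega) hb ⟨hcc, hd⟩)
      simpa using this
    · have hstep : ∀ res2 : Int × Option (List String),
          pvBgo idx ((PySem.List.enumerate ((pvT toks idx).take (pvKmax toks idx)) 1).drop j)
            ((pvCandL hts (pvT toks idx) j).map (fun h => (h, PySem.Set.ofList h)))
            (PySem.Set.ofList ((pvT toks idx).take j)) res2
          = (idx + k', (pvM hts (pvT toks idx) k').getLast?) := by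
        intro res2
        have := ih (j+1) (by omega) (by omega) (by omega) (by simpa using hndj) res2
        simpa using this
      split
      · exact hstep _
      · exact hstep _

theorem pv_A_unfold (toks : List String) (idx : Int) (hts : List (List String)) :
    partial_header toks idx hts
      = pvAgoA toks idx hts (PySem.List.pyRange ((toks.length : Int) - 1) idx (-1)) := by
  rw [partial_header, PySem.List.pyRange_neg_one_eq_reverse, PySem.List.len_eq]
  norm_num

theorem pv_clampIdx_last (n : Nat) : PySem.List.clampIdx n ((n : Int) - 1) = n - 1 := by
  rw [pv_clampIdx_eq]
  split_ifs <;> omega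

theorem pv_CandL_zero (hts : List (List String)) (t : List String) :
    pvCandL hts t 0 = hts.filter (fun h => PySem.List.len h ≤ 7) := by
  unfold pvCandL
  rw [List.take_zero, List.filter_eq_self.mpr]
  intro a _
  simp

theorem pv_B_unfold (toks : List String) (idx : Int) (hts : List (List String)) :
    partial_header_alt toks idx hts
      = pvBgo idx ((PySem.List.enumerate ((pvT toks idx).take (pvKmax toks idx)) 1).drop 0)
          ((pvCandL hts (pvT toks idx) 0).map (fun h => (h, PySem.Set.ofList h)))
          (PySem.Set.ofList ((pvT toks idx).take 0)) (idx, none) := by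
  have hslice : PySem.List.slice toks (some idx) (some (PySem.List.len toks - 1))
      = (pvT toks idx).take (pvKmax toks idx) := by
    rw [PySem.List.len_eq, pv_slice_eq, pv_clampIdx_last]
    rfl
  simp only [partial_header_alt, hslice, pv_CandL_zero, List.take_zero, List.drop_zero]
  rfl

theorem pv_idx_eq_s (toks : List String) (idx : Int) (h0 : 0 ≤ idx)
    (hk : 1 ≤ pvKmax toks idx) : (pvS toks idx : Int) = idx := by
  unfold pvKmax at hk
  unfold pvS at hk ⊢
  rw [pv_clampIdx_eq] at hk ⊢
  split_ifs at hk ⊢ <;> omega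

theorem pv_main (toks : List String) (idx : Int) (hts : List (List String)) (h0 : 0 ≤ idx) :
    partial_header toks idx hts = partial_header_alt toks idx hts := by
  by_cases hex : ∃ k, k ≤ pvKmax toks idx ∧ (2 ≤ k ∧ (pvM hts (pvT toks idx) k).length = 1)
  · obtain ⟨kw, hkw, hPkw⟩ := hex
    set P : Nat → Prop := fun k => 2 ≤ k ∧ (pvM hts (pvT toks idx) k).length = 1 with hP
    set k0 := Nat.findGreatest P (pvKmax toks idx) with hk0
    have hspec : P k0 := Nat.findGreatest_spec (P := P) hkw hPkw
    have hk0le : k0 ≤ pvKmax toks idx := Nat.findGreatest_le _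
    have hgr : ∀ k, k0 < k → k ≤ pvKmax toks idx → ¬ (2 ≤ k ∧ (pvM hts (pvT toks idx) k).length = 1) :=
      fun k a b => Nat.findGreatest_is_greatest a b
    have hk2 : 2 ≤ k0 := hspec.1
    have hIdx : (pvS toks idx : Int) = idx := pv_idx_eq_s toks idx h0 (by omega)
    have hbr : idx + 1 < (toks.length : Int) := by
      have hle : pvS toks idx ≤ toks.length := pv_clampIdx_le toks.length idx
      unfold pvKmax at hk0le
      omega
    have hA : partial_header toks idx hts
        = ((pvS toks idx : Int) + k0, (pvM hts (pvT toks idx) k0).getLast?) := by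
      rw [pv_A_unfold]
      refine pv_descend_some toks idx hts hbr k0 hspec.1 hk0le hspec.2 hgr
        (((toks.length : Int) - 1 - ((pvS toks idx : Int) + k0)).toNat) _ (le_refl _) ?_ (by omega)
      unfold pvKmax at hk0le
      omega
    have hB : partial_header_alt toks idx hts
        = (idx + k0, (pvM hts (pvT toks idx) k0).getLast?) := by
      rw [pv_B_unfold toks idx hts]
      exact pv_ascend_some toks idx hts k0 hspec.1 hk0le hspec.2 hgr
        (pvKmax toks idx) 1 (le_refl _) (by omega) (by omega) (by simp) _
    rw [hA, hB, hIdx]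
  · push Not at hex
    have hnone : ∀ k : Nat, k ≤ pvKmax toks idx → ¬(2 ≤ k ∧ (pvM hts (pvT toks idx) k).length = 1) := by
      intro k hk hPk
      exact absurd hPk (by
        have := hex k hk
        tauto)
    have hA : partial_header toks idx hts = (idx, none) := by
      rw [pv_A_unfold]
      exact pv_descend_none toks idx hts hnone (((toks.length : Int) - 1 - idx).toNat) _ (le_refl _) (by omega)
    have hB : partial_header_alt toks idx hts = (idx, none) := by
      rw [pv_B_unfold toks idx hts]
      refine pv_ascend toks idx hts (pvKmax toks idx) 1 (le_refl _) (by omega) (by omega) (by simp) _ ?_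
      rintro k' ⟨-, hb, hcc, hd, -⟩
      exact hnone k' hb ⟨hcc, hd⟩
    rw [hA, hB]

-- ===== VERDICT (by name: the statement is the Claim_ definition above) =====
theorem partial_header_spec : Claim_equal_partial_header := by
  intro toks idx hts _ hpre
  unfold Spec_partial_header
  exact pv_main toks idx hts hpre
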